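-- pv_equiv track=rewrite | github.com/duxng9324/Apple-Shop | chat-bot-be/app/services/llm_service.py | _lowest_price
-- ===== SOURCE A (Python) =====
-- def _lowest_price(product: dict):
--     prices = []
--     for item in product.get("list", []) or []:
--         if isinstance(item, dict) and item.get("price") is not None:
--             try:
--                 prices.append(int(item.get("price")))
--             except Exception:
--                 pass
--     return min(prices) if prices else None
-- ===== SOURCE B (Python) =====
-- def _lowest_price(product: dict):
--     def price_of(item):
--         # None unless item is a dict with a convertible non-None "price"
--         if isinstance(item, dict) and item.get("price") is not None:
--             try:
--                 return int(item.get("price"))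
--             except Exception:
--                 return None
--         return None
--
--     def go(items):
--         # recursion on the structure, combining back-to-front
--         if not items:
--             return None
--         rest_min = go(items[1:])
--         v = price_of(items[0])
--         if v is None:
--             return rest_min
--         if rest_min is None:
--             return v
--         return v if v < rest_min else rest_min
--
--     return go(list(product.get("list", []) or []))
-- ===== Notes on version B (the rewrite author's own statement) =====
-- stated objective: alternative
-- what changed: Replaces the imperative collect-all-prices-then-min() loop with a structural recursion that folds the item list back-to-front, combining each item's (optionally extracted) price with the minimum of the tail, never materialising a price list.
import Mathlib
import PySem

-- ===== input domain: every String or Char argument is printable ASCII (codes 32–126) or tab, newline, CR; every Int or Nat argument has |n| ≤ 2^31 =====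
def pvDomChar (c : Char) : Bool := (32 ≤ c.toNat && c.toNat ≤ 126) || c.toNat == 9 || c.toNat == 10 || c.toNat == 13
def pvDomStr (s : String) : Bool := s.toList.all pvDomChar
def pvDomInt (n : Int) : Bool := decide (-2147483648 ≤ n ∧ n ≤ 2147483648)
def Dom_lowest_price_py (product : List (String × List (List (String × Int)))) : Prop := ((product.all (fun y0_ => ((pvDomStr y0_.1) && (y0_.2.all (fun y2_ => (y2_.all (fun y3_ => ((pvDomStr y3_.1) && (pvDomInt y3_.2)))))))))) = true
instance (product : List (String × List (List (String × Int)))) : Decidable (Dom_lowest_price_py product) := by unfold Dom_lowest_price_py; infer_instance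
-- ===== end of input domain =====

-- B replaces A's collect-the-prices-then-min() loop by a structural recursion combining back-to-front (objective: alternative).

-- ===== PORT A =====
-- prices = []; for item in product.get("list", []) or []: if … price is not None: prices.append(int(price))
-- (isinstance(item, dict) is always true under the type convention; int() on an Int never raises)
def lowest_price_py (product : List (String × List (List (String × Int)))) : Option Int :=
  let items := (PySem.Dict.mk product).getD "list" []
  let prices := items.foldl (fun acc item =>
    match (PySem.Dict.mk item).get? "price" with
    | some p => acc ++ [p]
    | none => acc) []
  -- min(prices) if prices else None
  if prices = [] then none else PySem.List.min? prices (fun y => y)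

-- ===== PORT B =====
-- price_of(item): the optional extracted price of one item
def pvPriceOf (item : List (String × Int)) : Option Int :=
  (PySem.Dict.mk item).get? "price"

-- go(items): recursion on the structure, combining back-to-front
def pvGo : List (List (String × Int)) → Option Int
  | [] => none
  | item :: rest =>
      let restMin := pvGo rest
      match pvPriceOf item with
      | none => restMin
      | some v =>
          match restMin with
          | none => some v
          | some r => if v < r then some v else some r

def lowest_price_py_alt (product : List (String × List (List (String × Int)))) : Option Int :=
  pvGo ((PySem.Dict.mk product).getD "list" [])

-- ===== PRECONDITION & SPEC =====
def Spec_lowest_price_py (product : List (String × List (List (String × Int)))) (out : Option Int) : Prop := out = lowest_price_py_alt product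
instance (product : List (String × List (List (String × Int)))) (out : Option Int) : Decidable (Spec_lowest_price_py product out) := by unfold Spec_lowest_price_py; infer_instance

-- ===== CLAIM (what is proved, stated in full; the proofs are below) =====
def Claim_equal_lowest_price_py : Prop := ∀ (product : List (String × List (List (String × Int)))), Dom_lowest_price_py product → Spec_lowest_price_py product (lowest_price_py product)

-- ===== LEMMAS AND PROOFS =====

-- right-fold minimum of a plain Int list (the shape pvGo computes on the extracted prices)
def pvOminR : List Int → Option Int
  | [] => none
  | x :: t =>
      match pvOminR t with
      | none => some x
      | some r => if x < r then some x else some r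

theorem pvGo_eq_ominR (items : List (List (String × Int))) :
    pvGo items = pvOminR (items.filterMap pvPriceOf) := by
  induction items with
  | nil => rfl
  | cons item rest ih =>
      cases h : pvPriceOf item with
      | none => simp [pvGo, h, ih]
      | some v => simp [pvGo, h, ih, pvOminR]

theorem pvA_foldl_eq_filterMap (items : List (List (String × Int))) (acc : List Int) :
    items.foldl (fun acc item =>
      match (PySem.Dict.mk item).get? "price" with
      | some p => acc ++ [p]
      | none => acc) acc = acc ++ items.filterMap pvPriceOf := by
  induction items generalizing acc with
  | nil => simp
  | cons item rest ih =>
      cases h : (PySem.Dict.mk item).get? "price" with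
      | none => simp [List.foldl_cons, h, ih, pvPriceOf]
      | some p => simp [List.foldl_cons, h, ih, pvPriceOf]

theorem pvFoldl_min_eq (t : List Int) (x : Int) :
    t.foldl min x = (match pvOminR t with | none => x | some r => min x r) := by
  induction t generalizing x with
  | nil => rfl
  | cons y s ih =>
      simp only [List.foldl_cons, ih (min x y), pvOminR]
      cases hs : pvOminR s with
      | none => rfl
      | some r =>
          rcases lt_or_ge y r with h | h
          · simp [h, min_eq_left (le_of_lt h), min_assoc]
          · simp [not_lt.mpr h, min_eq_right h, min_assoc]

theorem pvMin?_eq_ominR (l : List Int) :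
    (if l = [] then none else PySem.List.min? l (fun y => y)) = pvOminR l := by
  cases l with
  | nil => rfl
  | cons x t =>
      simp only [pvOminR, List.cons_ne_nil, if_false, PySem.List.min?_id_cons,
        pvFoldl_min_eq t x]
      cases pvOminR t with
      | none => rfl
      | some r =>
          rcases lt_or_ge x r with h | h
          · simp [min_eq_left (le_of_lt h), h]
          · simp [min_eq_right h, not_lt.mpr h]

-- ===== VERDICT (by name: the statement is the Claim_ definition above) =====
theorem lowest_price_py_spec : Claim_equal_lowest_price_py := by
  intro product _
  unfold Spec_lowest_price_py lowest_price_py lowest_price_py_alt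
  simp only [pvA_foldl_eq_filterMap, List.nil_append, pvMin?_eq_ominR, pvGo_eq_ominR]
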